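-- pv_equiv track=rewrite | github.com/mvanede/advent-of-code-2020 | ass-day-21-2.py | round_of_deduction
-- ===== SOURCE A (Python) =====
-- import copy
--
-- def round_of_deduction(dlist_):
--     dlist_copy = copy.deepcopy(dlist_)
--     for k, v in dlist_.items():
--         if len(v) == 1:
--             for e, f in dlist_copy.items():
--                 if k != e and v[0] in f:
--                     f.remove(v[0])
--     return dlist_copy
-- ===== SOURCE B (Python) =====
-- def round_of_deduction(dlist_):
--     singles = {}
--     for v in dlist_.values():
--         if len(v) == 1:
--             singles[v[0]] = singles.get(v[0], 0) + 1
--     result = {}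
--     for e, f in dlist_.items():
--         budget = dict(singles)
--         if len(f) == 1:
--             budget[f[0]] = budget[f[0]] - 1
--         new_f = []
--         for y in f:
--             b = budget.get(y, 0)
--             if b > 0:
--                 budget[y] = b - 1
--             else:
--                 new_f.append(y)
--         result[e] = new_f
--     return result
-- ===== Notes on version B (the rewrite author's own statement) =====
-- stated objective: faster
-- what changed: Instead of deep-copying the dict and running a nested singleton-by-dict scan with repeated list.remove, B builds a counter of singleton values in one pass and then rebuilds each list in a single budget-driven walk (decrementing the counter copy, with a self-exclusion decrement for singleton entries), eliminating the deepcopy and the quadratic remove passes.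
import Mathlib
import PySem

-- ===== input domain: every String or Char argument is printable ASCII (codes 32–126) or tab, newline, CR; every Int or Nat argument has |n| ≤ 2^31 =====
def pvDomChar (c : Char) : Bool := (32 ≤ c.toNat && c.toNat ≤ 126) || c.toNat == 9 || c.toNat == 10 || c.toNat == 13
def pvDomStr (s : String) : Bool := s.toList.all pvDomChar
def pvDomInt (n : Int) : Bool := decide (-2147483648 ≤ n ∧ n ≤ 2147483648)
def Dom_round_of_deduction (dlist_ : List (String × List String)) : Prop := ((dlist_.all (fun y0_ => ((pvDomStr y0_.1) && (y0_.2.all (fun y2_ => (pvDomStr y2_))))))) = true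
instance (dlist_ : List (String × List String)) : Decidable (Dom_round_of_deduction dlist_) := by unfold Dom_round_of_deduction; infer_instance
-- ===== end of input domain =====

-- B replaces A's deepcopy + nested singleton-by-dict remove scans by one counter of singleton
-- values and a single budget-driven rebuild of each list.

-- ===== PORT A =====
-- for k, v in dlist_.items(): if len(v) == 1: for e, f in dlist_copy.items(): if k != e and v[0] in f: f.remove(v[0])
def round_of_deduction (dlist_ : List (String × List String)) : List (String × List String) :=
  dlist_.foldl (fun acc kv =>
    if kv.2.length == 1 then
      acc.map (fun ef =>
        if kv.1 != ef.1 && ef.2.contains (PySem.List.pyGetD kv.2 0 "") then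
          (ef.1, (PySem.List.remove? ef.2 (PySem.List.pyGetD kv.2 0 "")).getD ef.2)
        else ef)
    else acc) dlist_

-- ===== PORT B =====
-- counter of every singleton's value (Source B's `singles`)
def pvSingles (dlist_ : List (String × List String)) : PySem.Dict String Int :=
  dlist_.foldl (fun s kv =>
    if kv.2.length == 1 then
      s.insert (PySem.List.pyGetD kv.2 0 "") (s.getD (PySem.List.pyGetD kv.2 0 "") 0 + 1)
    else s) PySem.Dict.empty

-- Source B's inner rebuild loop (new_f.append = cons at each kept element)
def pvRebuild (f : List String) (budget : PySem.Dict String Int) : List String :=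
  match f with
  | [] => []
  | y :: rest =>
    let b := budget.getD y 0
    if b > 0 then pvRebuild rest (budget.insert y (b - 1))
    else y :: pvRebuild rest budget

-- Source B's `budget[f[0]]` never misses (f is a counted singleton), so getD is exact there
def round_of_deduction_alt (dlist_ : List (String × List String)) : List (String × List String) :=
  let singles := pvSingles dlist_
  dlist_.map (fun ef =>
    let budget :=
      if ef.2.length == 1 then
        singles.insert (PySem.List.pyGetD ef.2 0 "")
          (singles.getD (PySem.List.pyGetD ef.2 0 "") 0 - 1)
      else singles
    (ef.1, pvRebuild ef.2 budget))

-- ===== PRECONDITION & SPEC =====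
-- Pre_ excludes association lists with duplicate keys: they cannot represent a Python dict
-- (dict construction collapses duplicates before either function runs), so the keyed
-- self-exclusion `k != e` has no specified meaning on them.
def Pre_round_of_deduction (dlist_ : List (String × List String)) : Prop :=
  (dlist_.map Prod.fst).Nodup
instance (dlist_ : List (String × List String)) : Decidable (Pre_round_of_deduction dlist_) := by
  unfold Pre_round_of_deduction; infer_instance

def pvWitness_round_of_deduction : (List (String × List String)) :=
  [("a", ["x"]), ("b", ["x", "y"])]

def Spec_round_of_deduction (dlist_ : List (String × List String)) (out : List (String × List String)) : Prop := out = round_of_deduction_alt dlist_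
instance (dlist_ : List (String × List String)) (out : List (String × List String)) : Decidable (Spec_round_of_deduction dlist_ out) := by unfold Spec_round_of_deduction; infer_instance

-- ===== CLAIM (what is proved, stated in full; the proofs are below) =====
def Claim_equal_round_of_deduction : Prop := ∀ (dlist_ : List (String × List String)), Dom_round_of_deduction dlist_ → Pre_round_of_deduction dlist_ → Spec_round_of_deduction dlist_ (round_of_deduction dlist_)

-- ===== LEMMAS AND PROOFS =====

-- abstract rebuild against a functional removal budget
def pvReb (f : List String) (β : String → Int) : List String :=
  match f with
  | [] => []
  | y :: rest =>
    if β y > 0 then pvReb rest (fun z => if z = y then β y - 1 else β z)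
    else y :: pvReb rest β

-- removal budget A's nested loops apply to the entry keyed e, as a function of the value y
def pvBeta (L : List (String × List String)) (e : String) (y : String) : Int :=
  (L.countP (fun kv => decide (kv.1 ≠ e ∧ kv.2 = [y])) : Int)

lemma pvRebuild_eq_reb (f : List String) (d : PySem.Dict String Int) :
    pvRebuild f d = pvReb f (fun y => d.getD y 0) := by
  induction f generalizing d with
  | nil => rfl
  | cons y rest ih =>
    simp only [pvRebuild, pvReb]
    split_ifs with h
    · rw [ih]
      congr 1
      funext z
      rw [PySem.Dict.getD_insert]
    · rw [ih]

lemma pvReb_zero (f : List String) (β : String → Int) (h : ∀ y, β y = 0) :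
    pvReb f β = f := by
  induction f with
  | nil => rfl
  | cons y rest ih => simp [pvReb, h y, ih]

lemma pvReb_congr (f : List String) (β β' : String → Int) (h : ∀ y, β y = β' y) :
    pvReb f β = pvReb f β' := by
  have : β = β' := funext h
  rw [this]

-- removing the first occurrence, then rebuilding = rebuilding with one more unit of budget
lemma pvReb_erase (x : String) (f : List String) (β : String → Int)
    (hβ : ∀ y, 0 ≤ β y) :
    pvReb (f.erase x) β = pvReb f (fun z => if z = x then β z + 1 else β z) := by
  induction f generalizing β with
  | nil => rfl
  | cons y rest ih =>
    by_cases hyx : y = x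
    · subst hyx
      rw [List.erase_cons_head]
      have h1 : pvReb (y :: rest) (fun z => if z = y then β z + 1 else β z)
          = pvReb rest β := by
        simp only [pvReb]
        rw [if_pos (by have := hβ y; simp; omega)]
        congr 1
        funext z
        by_cases hz : z = y <;> simp [hz]
      rw [h1]
    · rw [List.erase_cons_tail (by simpa using hyx)]
      simp only [pvReb]
      have hy : (if y = x then β y + 1 else β y) = β y := by simp [hyx]
      rw [hy]
      split_ifs with h
      · rw [ih (fun z => if z = y then β y - 1 else β z)
            (by intro z; by_cases hz : z = y
                · simp [hz]; omega
                · simp [hz]; exact hβ z)]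
        congr 1
        funext z
        by_cases hz : z = y
        · subst hz; simp [hyx]
        · simp [hz]
      · rw [ih β hβ]

lemma pvBeta_nonneg (L : List (String × List String)) (e y : String) : 0 ≤ pvBeta L e y := by
  simp [pvBeta]

-- A's outer fold, characterised entrywise by the abstract rebuild
lemma pvA_char (L : List (String × List String)) (acc : List (String × List String)) :
    L.foldl (fun acc kv =>
      if kv.2.length == 1 then
        acc.map (fun ef =>
          if kv.1 != ef.1 && ef.2.contains (PySem.List.pyGetD kv.2 0 "") then
            (ef.1, (PySem.List.remove? ef.2 (PySem.List.pyGetD kv.2 0 "")).getD ef.2)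
          else ef)
      else acc) acc
    = acc.map (fun ef => (ef.1, pvReb ef.2 (pvBeta L ef.1))) := by
  induction L generalizing acc with
  | nil =>
    rw [List.foldl_nil]
    have hfun : (fun ef : String × List String => (ef.1, pvReb ef.2 (pvBeta [] ef.1))) = id := by
      funext ef
      rw [pvReb_zero _ _ (by intro y; simp [pvBeta])]
      rfl
    rw [hfun, List.map_id]
  | cons kv L ih =>
    obtain ⟨k, v⟩ := kv
    rw [List.foldl_cons, ih]
    by_cases hv : v.length = 1
    · obtain ⟨x, rfl⟩ := List.length_eq_one_iff.mp hv
      simp only [List.length_cons, List.length_nil, PySem.List.pyGetD_zero_cons]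
      rw [if_pos (by simp), List.map_map]
      apply List.map_congr_left
      intro ef _
      obtain ⟨e, f⟩ := ef
      simp only [Function.comp]
      have hstep : (if (k != e && f.contains x) = true then
            (e, (PySem.List.remove? f x).getD f) else (e, f))
          = (e, if k = e then f else f.erase x) := by
        by_cases hke : k = e
        · simp [hke]
        · by_cases hmem : x ∈ f
          · rw [PySem.List.remove?_eq_some_erase f x hmem]
            simp [hke, hmem]
          · have : f.erase x = f := List.erase_of_not_mem hmem
            simp [hke, hmem, this]
      rw [hstep]
      by_cases hke : k = e
      · simp only [if_pos hke]
        congr 1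
        apply pvReb_congr
        intro y
        simp [pvBeta, hke]
      · simp only [if_neg hke]
        rw [pvReb_erase x f (pvBeta L e) (fun y => pvBeta_nonneg L e y)]
        congr 1
        apply pvReb_congr
        intro y
        simp only [pvBeta, List.countP_cons]
        by_cases hyx : y = x
        · subst hyx; simp [hke]
        · have : ¬([x] = [y]) := by simpa using (fun h => hyx h.symm)
          simp [hyx, this]
    · have hb : (v.length == 1) = false := by simpa using hv
      rw [hb]
      simp only [Bool.false_eq_true, if_false]
      apply List.map_congr_left
      intro ef _
      congr 1
      apply pvReb_congr
      intro y
      have : ¬(v = [y]) := by intro h; rw [h] at hv; simp at hv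
      simp [pvBeta, this]

-- the singleton counter, characterised
lemma pvSingles_getD_aux (L : List (String × List String)) (d : PySem.Dict String Int) (y : String) :
    (L.foldl (fun s kv =>
      if kv.2.length == 1 then
        s.insert (PySem.List.pyGetD kv.2 0 "") (s.getD (PySem.List.pyGetD kv.2 0 "") 0 + 1)
      else s) d).getD y 0
    = d.getD y 0 + (L.countP (fun kv => decide (kv.2 = [y])) : Int) := by
  induction L generalizing d with
  | nil => simp
  | cons kv L ih =>
    obtain ⟨k, v⟩ := kv
    rw [List.foldl_cons, ih, List.countP_cons]
    by_cases hv : v.length = 1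
    · obtain ⟨x, rfl⟩ := List.length_eq_one_iff.mp hv
      simp only [List.length_cons, List.length_nil, PySem.List.pyGetD_zero_cons]
      rw [if_pos (by simp)]
      rw [PySem.Dict.getD_insert]
      by_cases hyx : y = x
      · subst hyx; simp; ring
      · have : ¬([x] = [y]) := by simpa using (fun h => hyx h.symm)
        simp [hyx, this]
    · have hb : (v.length == 1) = false := by simpa using hv
      rw [hb]
      have : ¬(v = [y]) := by intro h; rw [h] at hv; simp at hv
      simp [this]

lemma pvSingles_getD (L : List (String × List String)) (y : String) :
    (pvSingles L).getD y 0 = (L.countP (fun kv => decide (kv.2 = [y])) : Int) := by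
  rw [pvSingles, pvSingles_getD_aux]
  simp [PySem.Dict.getD_empty]

-- with nodup keys, excluding key e from the count = subtracting the entry (e,f) itself
lemma pvBeta_of_nodup (l : List (String × List String)) (e : String) (f : List String)
    (hnd : (l.map Prod.fst).Nodup) (hmem : (e, f) ∈ l) (y : String) :
    pvBeta l e y = (l.countP (fun kv => decide (kv.2 = [y])) : Int) - (if f = [y] then 1 else 0) := by
  induction l with
  | nil => simp at hmem
  | cons kv l ih =>
    rw [List.map_cons, List.nodup_cons] at hnd
    rcases List.mem_cons.mp hmem with h | h
    · subst h
      simp only [pvBeta, List.countP_cons]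
      have htail : l.countP (fun kv => decide (kv.1 ≠ e ∧ kv.2 = [y]))
          = l.countP (fun kv => decide (kv.2 = [y])) := by
        apply List.countP_congr
        intro kv hkv
        have : kv.1 ≠ e := by
          intro hk
          exact hnd.1 (hk ▸ List.mem_map.mpr ⟨kv, hkv, rfl⟩)
        simp [this]
      rw [pvBeta] at *
      push_cast [List.countP_cons, htail]
      by_cases hf : f = [y] <;> simp [hf]
    · have hke : kv.1 ≠ e := by
        intro hk
        exact hnd.1 (hk ▸ List.mem_map.mpr ⟨(e, f), h, rfl⟩)
      have := ih hnd.2 h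
      simp only [pvBeta, List.countP_cons] at *
      push_cast at *
      by_cases hv : kv.2 = [y] <;> simp [hv, hke] at * <;> omega

-- B, with the lets inlined (definitional)
lemma pvAlt_unfold (dlist_ : List (String × List String)) :
    round_of_deduction_alt dlist_
    = dlist_.map (fun ef =>
        (ef.1, pvRebuild ef.2
          (if ef.2.length == 1 then
            (pvSingles dlist_).insert (PySem.List.pyGetD ef.2 0 "")
              ((pvSingles dlist_).getD (PySem.List.pyGetD ef.2 0 "") 0 - 1)
          else pvSingles dlist_))) := rfl

-- ===== VERDICT (by name: the statement is the Claim_ definition above) =====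
theorem round_of_deduction_spec : Claim_equal_round_of_deduction := by
  intro dl hdom hpre
  unfold Spec_round_of_deduction
  rw [round_of_deduction, pvA_char dl dl, pvAlt_unfold]
  apply List.map_congr_left
  intro ef hmem
  obtain ⟨e, f⟩ := ef
  simp only
  rw [pvRebuild_eq_reb]
  congr 1
  apply pvReb_congr
  intro y
  by_cases hf : f.length = 1
  · obtain ⟨x, rfl⟩ := List.length_eq_one_iff.mp hf
    simp only [List.length_cons, List.length_nil, PySem.List.pyGetD_zero_cons]
    rw [if_pos (by simp), PySem.Dict.getD_insert,
        pvBeta_of_nodup dl e [x] hpre hmem y]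
    by_cases hyx : y = x
    · subst hyx
      rw [if_pos rfl, pvSingles_getD]
      simp
    · have hxy : ¬([x] = [y]) := by simpa using (fun h => hyx h.symm)
      rw [if_neg hyx, pvSingles_getD]
      simp [hxy]
  · have hb : (f.length == 1) = false := by simpa using hf
    rw [hb]
    simp only [Bool.false_eq_true, if_false]
    rw [pvBeta_of_nodup dl e f hpre hmem y, pvSingles_getD]
    have : ¬(f = [y]) := by intro h; rw [h] at hf; simp at hf
    simp [this]
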